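-- pv_equiv track=rewrite | github.com/sfd158/SimAndViewCharacter | VclSimuBackend/Common/Helper.py | mirror_name_list
-- ===== SOURCE A (Python) =====
-- from typing import Dict, Any, List
--
-- def mirror_name_list(name_list: List[str]):  # This is only tested on std-human.
--     indices = [i for i in range(len(name_list))]
--     def index(name):
--         try:
--             return name_list.index(name)
--         except ValueError:
--             return -1
--
--     for i, n in enumerate(name_list):
--         # rule 1: left->right
--         idx = -1
--         if n.find('left') == 0:
--             idx = index('right' + n[4:])
--         elif n.find('Left') == 0:
--             idx = index('Right' + n[4:])
--         elif n.find('LEFT') == 0: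
--             idx = index('RIGHT' + n[4:])
--         elif n.find('right') == 0:
--             idx = index('left' + n[5:])
--         elif n.find('Right') == 0:
--             idx = index('Left' + n[5:])
--         elif n.find('RIGHT') == 0:
--             idx = index('LEFT' + n[5:])
--         elif n.find('L') == 0:
--             idx = index('R' + n[1:])
--         elif n.find('l') == 0:
--             idx = index('r' + n[1:])
--         elif n.find('R') == 0:
--             idx = index('L' + n[1:])
--         elif n.find('r') == 0:
--             idx = index('l' + n[1:])
--
--         indices[i] = idx if idx >= 0 else i
--
--     return indices
-- ===== SOURCE B (Python) =====
-- _WORDS = (("left", "right"), ("Left", "Right"), ("LEFT", "RIGHT"))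
--
--
-- def _mirror(n):
--     """Mirrored counterpart of n, or None if n carries no side prefix."""
--     for l, r in _WORDS:
--         if n.startswith(l):
--             return r + n[len(l):]
--     for l, r in _WORDS:
--         if n.startswith(r):
--             return l + n[len(r):]
--     c = n[:1]
--     if c in ("L", "l"):
--         return chr(ord(c) + 6) + n[1:]   # 'L'->'R', 'l'->'r'
--     if c in ("R", "r"):
--         return chr(ord(c) - 6) + n[1:]   # 'R'->'L', 'r'->'l'
--     return None
--
--
-- def _find(keys, x):
--     """Leftmost insertion point of x in the sorted list keys (hand-rolled bisect_left)."""
--     lo, hi = 0, len(keys)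
--     while lo < hi:
--         mid = (lo + hi) // 2
--         if keys[mid] < x:
--             lo = mid + 1
--         else:
--             hi = mid
--     return lo
--
--
-- def mirror_name_list(name_list):
--     # stage 1: sorted distinct names; firsts[k] = first index of keys[k] in name_list
--     keys = sorted(set(name_list))
--     firsts = [0] * len(keys)
--     for i in range(len(name_list) - 1, -1, -1):
--         firsts[_find(keys, name_list[i])] = i
--     # stage 2: binary-search each name's mirrored counterpart
--     out = []
--     for i, n in enumerate(name_list):
--         m = _mirror(n)
--         if m is not None:
--             j = _find(keys, m)
--             if j < len(keys) and keys[j] == m: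
--                 out.append(firsts[j])
--                 continue
--         out.append(i)
--     return out
-- ===== Notes on version B (the rewrite author's own statement) =====
-- stated objective: alternative
-- what changed: B replaces A's if/elif chain with per-name linear list.index scans by a sort-then-binary-search join: it sorts the distinct names once, fills a first-occurrence table by a single reverse index pass, and binary-searches each name's mirrored counterpart in the sorted keys.
import Mathlib
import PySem

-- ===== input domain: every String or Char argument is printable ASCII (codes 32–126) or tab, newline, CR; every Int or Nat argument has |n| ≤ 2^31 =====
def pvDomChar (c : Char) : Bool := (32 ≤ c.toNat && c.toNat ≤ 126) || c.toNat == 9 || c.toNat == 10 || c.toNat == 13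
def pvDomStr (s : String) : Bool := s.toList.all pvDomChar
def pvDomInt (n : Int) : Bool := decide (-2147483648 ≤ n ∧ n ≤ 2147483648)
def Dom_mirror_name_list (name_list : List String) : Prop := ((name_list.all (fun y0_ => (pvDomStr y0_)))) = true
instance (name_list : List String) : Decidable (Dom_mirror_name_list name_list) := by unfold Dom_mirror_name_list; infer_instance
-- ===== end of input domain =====

-- B replaces A's per-name list.index scans by a different mechanism: sort the distinct names once,
-- fill a first-occurrence table with a reverse index pass, and binary-search each mirrored name.

-- ===== PORT A =====
-- A's local helper `index`: name_list.index(name), -1 on ValueError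
def pvIndex (name_list : List String) (name : String) : Int :=
  match PySem.List.index? name_list name with
  | some k => (k : Int)
  | none => -1

-- the body of A's loop computing `idx` for one name n (the if/elif chain, in order)
def pvIdxA (name_list : List String) (n : String) : Int :=
  if PySem.Str.find n "left" == 0 then pvIndex name_list ("right" ++ PySem.Str.slice n (some 4) none)
  else if PySem.Str.find n "Left" == 0 then pvIndex name_list ("Right" ++ PySem.Str.slice n (some 4) none)
  else if PySem.Str.find n "LEFT" == 0 then pvIndex name_list ("RIGHT" ++ PySem.Str.slice n (some 4) none)
  else if PySem.Str.find n "right" == 0 then pvIndex name_list ("left" ++ PySem.Str.slice n (some 5) none)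
  else if PySem.Str.find n "Right" == 0 then pvIndex name_list ("Left" ++ PySem.Str.slice n (some 5) none)
  else if PySem.Str.find n "RIGHT" == 0 then pvIndex name_list ("LEFT" ++ PySem.Str.slice n (some 5) none)
  else if PySem.Str.find n "L" == 0 then pvIndex name_list ("R" ++ PySem.Str.slice n (some 1) none)
  else if PySem.Str.find n "l" == 0 then pvIndex name_list ("r" ++ PySem.Str.slice n (some 1) none)
  else if PySem.Str.find n "R" == 0 then pvIndex name_list ("L" ++ PySem.Str.slice n (some 1) none)
  else if PySem.Str.find n "r" == 0 then pvIndex name_list ("l" ++ PySem.Str.slice n (some 1) none)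
  else -1

def mirror_name_list (name_list : List String) : List Int :=
  -- indices = [i for i in range(len(name_list))]
  (PySem.List.enumerate name_list 0).foldl
    (fun indices p =>
      let idx := pvIdxA name_list p.2
      -- indices[i] = idx if idx >= 0 else i — i from enumerate is always 0 ≤ i < len(indices), so List.set is exact here
      indices.set p.1.toNat (if idx ≥ 0 then idx else p.1))
    (PySem.List.pyRange 0 name_list.length 1)

-- ===== PORT B =====
def pvWords : List (String × String) :=
  [("left", "right"), ("Left", "Right"), ("LEFT", "RIGHT")]

-- first loop of _mirror: left-side word prefixes
def pvWordsL : List (String × String) → String → Option String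
  | [], _ => none
  | (l, r) :: rest, n =>
    if PySem.Str.startswith n l then some (r ++ PySem.Str.slice n (some (PySem.Str.len l)) none)
    else pvWordsL rest n

-- second loop of _mirror: right-side word prefixes
def pvWordsR : List (String × String) → String → Option String
  | [], _ => none
  | (l, r) :: rest, n =>
    if PySem.Str.startswith n r then some (l ++ PySem.Str.slice n (some (PySem.Str.len r)) none)
    else pvWordsR rest n

-- _mirror: word pairs, then the single-letter chr(ord±6) case.
-- c = n[:1] is the head code point when n ≠ '' (and '' matches no test); chr/ord act on that code point.
def pvMirror (n : String) : Option String :=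
  match pvWordsL pvWords n with
  | some m => some m
  | none =>
    match pvWordsR pvWords n with
    | some m => some m
    | none =>
      match n.toList with
      | [] => none
      | c :: _ =>
        if c == 'L' || c == 'l' then
          some (String.ofList [Char.ofNat (c.toNat + 6)] ++ PySem.Str.slice n (some 1) none)
        else if c == 'R' || c == 'r' then
          some (String.ofList [Char.ofNat (c.toNat - 6)] ++ PySem.Str.slice n (some 1) none)
        else none

-- _find: hand-rolled lower-bound binary search; lo, hi stay in 0..len(keys) so Nat and
-- List.getD are exact (keys[mid] always has 0 ≤ lo ≤ mid < hi ≤ len(keys))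
def pvFind (keys : List String) (x : String) (lo hi : Nat) : Nat :=
  if h : lo < hi then
    let mid := (lo + hi) / 2
    if keys.getD mid "" < x then pvFind keys x (mid + 1) hi else pvFind keys x lo mid
  else lo
termination_by hi - lo
decreasing_by all_goals omega

-- keys = sorted(set(name_list))
def pvKeys (xs : List String) : List String :=
  PySem.List.sorted (PySem.Set.ofList xs) (fun s => s) false

-- firsts = [0]*len(keys); for i in range(len(name_list)-1, -1, -1): firsts[_find(keys, name_list[i])] = i
-- (the written slot always exists: name_list[i] is in keys; List.set is exact there)
def pvFirsts (xs : List String) (keys : List String) : List Int :=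
  (PySem.List.pyRange ((xs.length : Int) - 1) (-1) (-1)).foldl
    (fun f i => f.set (pvFind keys (PySem.List.pyGetD xs i "") 0 keys.length) i)
    (List.replicate keys.length 0)

def mirror_name_list_alt (name_list : List String) : List Int :=
  let keys := pvKeys name_list
  let firsts := pvFirsts name_list keys
  (PySem.List.enumerate name_list 0).foldl
    (fun out p =>
      match pvMirror p.2 with
      | some m =>
        let j := pvFind keys m 0 keys.length
        if j < keys.length && (keys.getD j "" == m) then out ++ [firsts.getD j 0]
        else out ++ [p.1]
      | none => out ++ [p.1]) []

-- ===== PRECONDITION & SPEC =====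
def Spec_mirror_name_list (name_list : List String) (out : List Int) : Prop := out = mirror_name_list_alt name_list
instance (name_list : List String) (out : List Int) : Decidable (Spec_mirror_name_list name_list out) := by unfold Spec_mirror_name_list; infer_instance

-- ===== CLAIM (what is proved, stated in full; the proofs are below) =====
def Claim_equal_mirror_name_list : Prop := ∀ (name_list : List String), Dom_mirror_name_list name_list → Spec_mirror_name_list name_list (mirror_name_list name_list)

-- ===== LEMMAS AND PROOFS =====

-- n.find(p) == 0 is exactly n.startswith(p)
theorem pv_find_zero_eq (n p : String) :
    (PySem.Str.find n p == 0) = PySem.Str.startswith n p := by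
  simp only [PySem.Str.find_eq, PySem.Str.startswith_eq]
  rcases h : PySem.Chars.startswith n.toList p.toList with _ | _
  · rw [beq_eq_false_iff_ne]
    intro h0
    have := (PySem.Chars.find_spec (s := n.toList) (sub := p.toList) (by rw [h0])).1
    rw [h0] at this
    simp only [Int.toNat_zero, List.drop_zero] at this
    rw [← PySem.Chars.startswith_iff] at this
    simp [this] at h
  · have hpre := (PySem.Chars.startswith_iff n.toList p.toList).mp h
    have hnn : 0 ≤ PySem.Chars.find n.toList p.toList :=
      (PySem.Chars.find_nonneg_iff _ _).mpr hpre.isInfix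
    have hmin := (PySem.Chars.find_spec hnn).2
    have hz : PySem.Chars.find n.toList p.toList = 0 := by
      by_contra hne
      have hpos : 0 < (PySem.Chars.find n.toList p.toList).toNat := by omega
      have := hmin 0 hpos
      simp only [List.drop_zero] at this
      exact this hpre
    simp [hz]

-- startswith by a single-character prefix is a test on the head code point
theorem pv_sw_single (n : String) (c d : Char) (rest : List Char) (h : n.toList = c :: rest)
    (p : String) (hp : p.toList = [d]) :
    PySem.Str.startswith n p = (c == d) := by
  rw [PySem.Str.startswith_eq, h, hp]
  simp [PySem.Chars.startswith, List.isPrefixOf, BEq.comm]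

-- A's if/elif chain computes: mirror the name (B's _mirror), then index it
set_option maxHeartbeats 2000000 in
theorem pv_idxA_eq_mirror (xs : List String) (n : String) :
    pvIdxA xs n = (match pvMirror n with
                   | some m => pvIndex xs m
                   | none => -1) := by
  rw [pvIdxA, pvMirror]
  simp only [pv_find_zero_eq, pvWords, pvWordsL, pvWordsR,
    show PySem.Str.len "left" = 4 from by decide,
    show PySem.Str.len "Left" = 4 from by decide,
    show PySem.Str.len "LEFT" = 4 from by decide,
    show PySem.Str.len "right" = 5 from by decide,
    show PySem.Str.len "Right" = 5 from by decide,
    show PySem.Str.len "RIGHT" = 5 from by decide]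
  rcases hn : n.toList with _ | ⟨c, rest⟩
  · have e1 : PySem.Str.startswith n "left" = false := by rw [PySem.Str.startswith_eq, hn]; decide
    have e2 : PySem.Str.startswith n "Left" = false := by rw [PySem.Str.startswith_eq, hn]; decide
    have e3 : PySem.Str.startswith n "LEFT" = false := by rw [PySem.Str.startswith_eq, hn]; decide
    have e4 : PySem.Str.startswith n "right" = false := by rw [PySem.Str.startswith_eq, hn]; decide
    have e5 : PySem.Str.startswith n "Right" = false := by rw [PySem.Str.startswith_eq, hn]; decide
    have e6 : PySem.Str.startswith n "RIGHT" = false := by rw [PySem.Str.startswith_eq, hn]; decide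
    have e7 : PySem.Str.startswith n "L" = false := by rw [PySem.Str.startswith_eq, hn]; decide
    have e8 : PySem.Str.startswith n "l" = false := by rw [PySem.Str.startswith_eq, hn]; decide
    have e9 : PySem.Str.startswith n "R" = false := by rw [PySem.Str.startswith_eq, hn]; decide
    have e10 : PySem.Str.startswith n "r" = false := by rw [PySem.Str.startswith_eq, hn]; decide
    simp only [e1, e2, e3, e4, e5, e6, e7, e8, e9, e10, Bool.false_eq_true, if_false]
  · have hL : PySem.Str.startswith n "L" = (c == 'L') := pv_sw_single n c 'L' rest hn "L" (by decide)
    have hl : PySem.Str.startswith n "l" = (c == 'l') := pv_sw_single n c 'l' rest hn "l" (by decide)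
    have hR : PySem.Str.startswith n "R" = (c == 'R') := pv_sw_single n c 'R' rest hn "R" (by decide)
    have hr : PySem.Str.startswith n "r" = (c == 'r') := pv_sw_single n c 'r' rest hn "r" (by decide)
    simp only [hL, hl, hR, hr]
    split_ifs <;>
      simp_all [beq_iff_eq,
        show String.ofList [Char.ofNat ('L'.toNat + 6)] = "R" from by decide,
        show String.ofList [Char.ofNat ('l'.toNat + 6)] = "r" from by decide,
        show String.ofList [Char.ofNat ('R'.toNat - 6)] = "L" from by decide,
        show String.ofList [Char.ofNat ('r'.toNat - 6)] = "l" from by decide]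

-- binary-search invariant for pvFind on a (·≤·)-sorted list
theorem pvFind_spec (keys : List String) (x : String)
    (hs : List.Pairwise (· ≤ ·) keys) :
    ∀ (d lo hi : Nat), hi - lo = d → lo ≤ hi → hi ≤ keys.length →
      (∀ k (hk : k < keys.length), k < lo → keys[k] < x) →
      (∀ k (hk : k < keys.length), hi ≤ k → x ≤ keys[k]) →
      pvFind keys x lo hi ≤ keys.length ∧
      (∀ k (hk : k < keys.length), k < pvFind keys x lo hi → keys[k] < x) ∧
      (∀ k (hk : k < keys.length), pvFind keys x lo hi ≤ k → x ≤ keys[k]) := by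
  intro d
  induction d using Nat.strong_induction_on with
  | _ d ih =>
    intro lo hi hd hlh hhl hlow hup
    rw [pvFind]
    by_cases h : lo < hi
    · simp only [h, dif_pos]
      have hmid1 : lo ≤ (lo + hi) / 2 := by omega
      have hmid2 : (lo + hi) / 2 < hi := by omega
      have hmlen : (lo + hi) / 2 < keys.length := by omega
      rw [List.getD_eq_getElem keys "" hmlen]
      have hpw := List.pairwise_iff_getElem.mp hs
      by_cases hcmp : keys[(lo + hi) / 2] < x
      · simp only [hcmp, if_pos]
        exact ih (hi - ((lo + hi) / 2 + 1)) (by omega) _ _ rfl (by omega) hhl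
          (fun k hk hklt => by
            rcases Nat.lt_or_ge k ((lo + hi) / 2) with hk2 | hk2
            · exact lt_of_le_of_lt (hpw k ((lo + hi) / 2) hk hmlen hk2) hcmp
            · have : k = (lo + hi) / 2 := by omega
              subst this; exact hcmp)
          hup
      · simp only [hcmp, if_false]
        have hxle : x ≤ keys[(lo + hi) / 2] := le_of_not_gt hcmp
        exact ih ((lo + hi) / 2 - lo) (by omega) _ _ rfl (by omega) (by omega) hlow
          (fun k hk hkge => by
            rcases Nat.lt_or_ge ((lo + hi) / 2) k with hk2 | hk2
            · exact le_trans hxle (hpw _ k hmlen hk hk2)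
            · have : k = (lo + hi) / 2 := by omega
              subst this; exact hxle)
    · simp only [h, dite_false]
      have : lo = hi := by omega
      subst this
      exact ⟨hhl, fun k hk hklt => hlow k hk hklt, fun k hk hkge => hup k hk hkge⟩

-- on a strictly sorted list, pvFind locates a present element exactly
theorem pvFind_pos (keys : List String) (hs : List.Pairwise (· < ·) keys)
    (x : String) (hx : x ∈ keys) :
    ∃ (h : pvFind keys x 0 keys.length < keys.length),
      keys[pvFind keys x 0 keys.length] = x := by
  have hs' : List.Pairwise (· ≤ ·) keys := hs.imp le_of_lt
  obtain ⟨hbound, hlow, hup⟩ := pvFind_spec keys x hs' (keys.length - 0) 0 keys.length rfl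
    (Nat.zero_le _) le_rfl (fun k hk hklt => absurd hklt (Nat.not_lt_zero k))
    (fun k hk hkge => absurd hk (by omega))
  obtain ⟨p, hp, hpx⟩ := List.mem_iff_getElem.mp hx
  set r := pvFind keys x 0 keys.length with hr
  have hrp : r ≤ p := by
    by_contra hc
    have := hlow p hp (by omega)
    rw [hpx] at this
    exact lt_irrefl x this
  have hrlen : r < keys.length := lt_of_le_of_lt hrp hp
  refine ⟨hrlen, ?_⟩
  have h1 : x ≤ keys[r] := hup r hrlen le_rfl
  have h2 : keys[r] ≤ x := by
    rcases Nat.lt_or_ge r p with hlt | hge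
    · rw [← hpx]
      exact le_of_lt (List.pairwise_iff_getElem.mp hs r p hrlen hp hlt)
    · have : r = p := by omega
      subst this; rw [hpx]
  exact le_antisymm h2 h1

-- writing firsts back-to-front leaves, in each slot, the FIRST index mapped to it
theorem pv_foldr_set_getD (g : Nat → Nat) (r : Nat) (d : Int) :
    ∀ (n : Nat) (init : List Int), r < init.length →
      ((List.range n).foldr (fun k f => f.set (g k) ((k : Nat) : Int)) init).getD r d =
        (match (List.range n).find? (fun k => g k == r) with
         | some k => ((k : Nat) : Int)
         | none => init.getD r d) := by
  intro n
  induction n with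
  | zero => intro init hr; simp
  | succ n ih =>
    intro init hr
    rw [List.range_succ, List.foldr_append]
    simp only [List.foldr_cons, List.foldr_nil]
    rw [ih (init.set (g n) ((n : Nat) : Int)) (by simpa using hr)]
    rw [List.find?_append]
    cases hf : (List.range n).find? (fun k => g k == r) with
    | some k => simp
    | none =>
      simp only [Option.none_or]
      by_cases hgn : g n = r
      · subst hgn
        simp only [List.find?_cons, beq_self_eq_true]
        rw [List.getD_eq_getElem _ d (by simpa using hr),
            List.getElem_set_self (by simpa using hr)]
      · have : (g n == r) = false := by simpa using hgn
        simp only [List.find?_cons, this, List.find?_nil]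
        rw [List.getD_eq_getElem _ d (by simpa using hr), List.getD_eq_getElem _ d hr]
        rw [List.getElem_set_ne hgn]

-- list.index as a scan of positions
theorem pv_index?_eq_find?_range (xs : List String) (m : String) :
    PySem.List.index? xs m = (List.range xs.length).find? (fun k => xs.getD k "" == m) := by
  induction xs with
  | nil => simp [PySem.List.index?_eq_idxOf?]
  | cons a t ih =>
    rw [List.length_cons, List.range_succ_eq_map]
    simp only [List.find?_cons]
    by_cases ha : a = m
    · subst ha
      rw [PySem.List.index?_cons_self]
      simp
    · have hne : (a == m) = false := by simpa using ha
      rw [PySem.List.index?_cons_of_ne _ ha]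
      simp only [List.getD_cons_zero, hne]
      rw [List.find?_map]
      have hc : ((fun k => (a :: t).getD k "" == m) ∘ Nat.succ) = (fun k => t.getD k "" == m) := by
        funext k; simp
      rw [hc, ← ih]

theorem pv_find?_congr {p q : Nat → Bool} : ∀ (l : List Nat), (∀ k ∈ l, p k = q k) → l.find? p = l.find? q := by
  intro l
  induction l with
  | nil => intro _; rfl
  | cons a t ih =>
    intro h
    simp only [List.find?_cons, h a (List.mem_cons_self)]
    rcases q a with _ | _
    · exact ih (fun k hk => h k (List.mem_cons_of_mem a hk))
    · rfl

theorem pv_keys_sorted (xs : List String) : List.Pairwise (· < ·) (pvKeys xs) :=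
  PySem.List.sorted_ofList_pairwise_lt xs

theorem pv_mem_keys (xs : List String) (m : String) : m ∈ pvKeys xs ↔ m ∈ xs := by
  rw [pvKeys, PySem.List.mem_sorted, PySem.Set.mem_ofList]

-- the firsts table holds, under each key, the first index of that key in name_list
theorem pv_firsts_getD (xs : List String) (r : Nat) (hr : r < (pvKeys xs).length) :
    (pvFirsts xs (pvKeys xs)).getD r 0 =
      (match PySem.List.index? xs ((pvKeys xs)[r]) with
       | some k => ((k : Nat) : Int)
       | none => 0) := by
  rw [pvFirsts, PySem.List.pyRange_neg_one_eq_reverse]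
  rw [show ((-1:Int))+1 = 0 from by norm_num,
      show ((xs.length:Int)-1)+1 = ((xs.length:Nat):Int) from by ring]
  rw [PySem.List.pyRange_zero_natCast, List.foldl_reverse, List.foldr_map]
  simp only [PySem.List.pyGetD_natCast]
  rw [pv_foldr_set_getD (fun k => pvFind (pvKeys xs) (xs.getD k "") 0 (pvKeys xs).length) r 0
        xs.length _ (by simpa using hr)]
  rw [pv_find?_congr (q := fun k => xs.getD k "" == (pvKeys xs)[r]) (List.range xs.length) ?hcong]
  · rw [← pv_index?_eq_find?_range]
    cases hidx : PySem.List.index? xs ((pvKeys xs)[r]) with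
    | some k => rfl
    | none => simp
  case hcong =>
    intro k hk
    have hklt : k < xs.length := List.mem_range.mp hk
    have hkx : xs.getD k "" ∈ xs := by
      rw [List.getD_eq_getElem _ _ hklt]; exact List.getElem_mem _
    have hky : xs.getD k "" ∈ pvKeys xs := (pv_mem_keys xs _).mpr hkx
    obtain ⟨hlt, heq⟩ := pvFind_pos (pvKeys xs) (pv_keys_sorted xs) _ hky
    rw [Bool.eq_iff_iff]
    simp only [beq_iff_eq]
    constructor
    · intro hgr
      simp only [hgr] at heq
      exact heq.symm
    · intro hxm
      have h2 : (pvKeys xs)[pvFind (pvKeys xs) (xs.getD k "") 0 (pvKeys xs).length]'hlt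
          = (pvKeys xs)[r]'hr := by rw [heq, hxm]
      by_contra hne
      have hpw := List.pairwise_iff_getElem.mp (pv_keys_sorted xs)
      rcases Nat.lt_or_ge (pvFind (pvKeys xs) (xs.getD k "") 0 (pvKeys xs).length) r with hc | hc
      · exact absurd h2 (ne_of_lt (hpw _ _ hlt hr hc))
      · have hc2 : r < pvFind (pvKeys xs) (xs.getD k "") 0 (pvKeys xs).length := by omega
        exact absurd h2.symm (ne_of_lt (hpw _ _ hr hlt hc2))

-- B's lookup (binary search + firsts table) equals A's index helper
theorem pv_lookup_eq (xs : List String) (m : String) :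
    (if pvFind (pvKeys xs) m 0 (pvKeys xs).length < (pvKeys xs).length &&
        ((pvKeys xs).getD (pvFind (pvKeys xs) m 0 (pvKeys xs).length) "" == m)
     then (pvFirsts xs (pvKeys xs)).getD (pvFind (pvKeys xs) m 0 (pvKeys xs).length) 0 else -1)
      = pvIndex xs m := by
  by_cases hm : m ∈ xs
  · have hky : m ∈ pvKeys xs := (pv_mem_keys xs m).mpr hm
    obtain ⟨hlt, heq⟩ := pvFind_pos (pvKeys xs) (pv_keys_sorted xs) m hky
    have hcond : (decide (pvFind (pvKeys xs) m 0 (pvKeys xs).length < (pvKeys xs).length) &&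
        ((pvKeys xs).getD (pvFind (pvKeys xs) m 0 (pvKeys xs).length) "" == m)) = true := by
      rw [List.getD_eq_getElem _ _ hlt, heq]
      simp [hlt]
    rw [if_pos hcond]
    have := pv_firsts_getD xs (pvFind (pvKeys xs) m 0 (pvKeys xs).length) hlt
    rw [heq] at this
    rw [this, pvIndex]
    cases hidx : PySem.List.index? xs m with
    | some k => rfl
    | none => exact absurd ((PySem.List.index?_eq_none_iff xs m).mp hidx) (by simpa using hm)
  · rw [if_neg (by
      intro hc
      simp only [Bool.and_eq_true, decide_eq_true_eq, beq_iff_eq] at hc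
      obtain ⟨hjl, hgd⟩ := hc
      rw [List.getD_eq_getElem?_getD, List.getElem?_eq_getElem hjl, Option.getD_some] at hgd
      exact hm ((pv_mem_keys xs m).mp (hgd ▸ List.getElem_mem hjl)))]
    rw [pvIndex]
    have : PySem.List.index? xs m = none := (PySem.List.index?_eq_none_iff xs m).mpr hm
    rw [this]

-- A's in-place `indices[i] = …` loop produces a map over enumerate
theorem pv_setfold (f : Int × String → Int) :
    ∀ (xs : List String) (k : Nat) (init : List Int), init.length = k + xs.length →
      (PySem.List.enumerate xs (k : Int)).foldl (fun ind p => ind.set p.1.toNat (f p)) init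
        = init.take k ++ (PySem.List.enumerate xs (k : Int)).map f := by
  intro xs
  induction xs with
  | nil =>
    intro k init hlen
    simp only [List.length_nil, Nat.add_zero] at hlen
    simp [PySem.List.enumerate_nil, List.take_of_length_le (le_of_eq hlen)]
  | cons y ys ih =>
    intro k init hlen
    simp only [List.length_cons] at hlen
    rw [PySem.List.enumerate_cons]
    simp only [List.foldl_cons, List.map_cons, Int.toNat_natCast]
    have hk1 : (k : Int) + 1 = ((k + 1 : Nat) : Int) := by push_cast; ring
    rw [hk1]
    rw [ih (k + 1) (init.set k (f ((k : Int), y))) (by simp only [List.length_set]; omega)]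
    have hklt : k < init.length := by omega
    rw [List.set_eq_take_append_cons_drop, if_pos hklt]
    rw [List.take_append]
    simp [List.length_take, Nat.min_eq_left (le_of_lt hklt), List.take_take]

-- per-name agreement: A's chain-and-scan value is B's mirror-search-lookup value
theorem pv_point (xs : List String) (i : Int) (n : String) :
    (if pvIdxA xs n ≥ 0 then pvIdxA xs n else i)
      = (match pvMirror n with
         | some m =>
           if pvFind (pvKeys xs) m 0 (pvKeys xs).length < (pvKeys xs).length &&
               ((pvKeys xs).getD (pvFind (pvKeys xs) m 0 (pvKeys xs).length) "" == m)
           then (pvFirsts xs (pvKeys xs)).getD (pvFind (pvKeys xs) m 0 (pvKeys xs).length) 0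
           else i
         | none => i) := by
  rw [pv_idxA_eq_mirror xs n]
  cases hm : pvMirror n with
  | none => norm_num
  | some m =>
    show (if pvIndex xs m ≥ 0 then pvIndex xs m else i)
      = (if pvFind (pvKeys xs) m 0 (pvKeys xs).length < (pvKeys xs).length &&
            ((pvKeys xs).getD (pvFind (pvKeys xs) m 0 (pvKeys xs).length) "" == m)
         then (pvFirsts xs (pvKeys xs)).getD (pvFind (pvKeys xs) m 0 (pvKeys xs).length) 0
         else i)
    have hlk := pv_lookup_eq xs m
    rcases hcond : (decide (pvFind (pvKeys xs) m 0 (pvKeys xs).length < (pvKeys xs).length) &&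
        ((pvKeys xs).getD (pvFind (pvKeys xs) m 0 (pvKeys xs).length) "" == m)) with _ | _
    · rw [hcond, if_neg Bool.false_ne_true] at hlk
      rw [← hlk]
      norm_num
    · rw [hcond, if_pos rfl] at hlk
      rw [if_pos rfl, ← hlk]
      have hcond' := hcond
      simp only [Bool.and_eq_true, decide_eq_true_eq, beq_iff_eq] at hcond'
      obtain ⟨hjl, hgd⟩ := hcond'
      rw [List.getD_eq_getElem?_getD, List.getElem?_eq_getElem hjl, Option.getD_some] at hgd
      have hmem : m ∈ xs := (pv_mem_keys xs m).mp (hgd ▸ List.getElem_mem hjl)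
      obtain ⟨k, hk⟩ := Option.isSome_iff_exists.mp ((PySem.List.index?_isSome_iff xs m).mpr hmem)
      rw [hlk, pvIndex, hk, if_pos (by positivity)]

-- ===== VERDICT (by name: the statement is the Claim_ definition above) =====
theorem mirror_name_list_spec : Claim_equal_mirror_name_list := by
  intro xs _
  unfold Spec_mirror_name_list mirror_name_list mirror_name_list_alt
  conv_lhs => rw [show (0 : Int) = ((0 : Nat) : Int) from rfl,
    pv_setfold _ xs 0 _ (by simp [PySem.List.length_pyRange_one])]
  simp only [Nat.cast_zero, List.take_zero, List.nil_append]
  rw [PySem.List.foldl_congr_mem (PySem.List.enumerate xs 0) _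
      (fun out p => out ++ [(match pvMirror p.2 with
        | some m =>
          if pvFind (pvKeys xs) m 0 (pvKeys xs).length < (pvKeys xs).length &&
              ((pvKeys xs).getD (pvFind (pvKeys xs) m 0 (pvKeys xs).length) "" == m)
          then (pvFirsts xs (pvKeys xs)).getD (pvFind (pvKeys xs) m 0 (pvKeys xs).length) 0
          else p.1
        | none => p.1 : Int)]) []
      (by
        intro acc p _
        cases hm : pvMirror p.2 with
        | some m => simp only [hm]; split <;> rfl
        | none => simp only [hm])]
  rw [PySem.List.foldl_append_singleton_eq_map]
  simp only [List.nil_append]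
  exact List.map_congr_left (fun p _ => pv_point xs p.1 p.2)
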